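-- pv_equiv track=rewrite | github.com/intel/workload-services-framework | script/cumulus/pkb/perfkitbenchmarker/data/collectd_plugins/network_irq_affinity.py | _GetCpusFromIrqAffinity
-- ===== SOURCE A (Python) =====
-- def _GetCpusFromIrqAffinity(affinity):
--     """returns a list of ints representing a single irq's associated CPUs"""
--     """e.g. 00000000,10000000,00000000"""
--     cpus = []
--     position = 0
--     for c in reversed(affinity):
--         if c == ',':
--             continue
--         n = int(c, 16)
--         for i in range(4):
--             if n & 2 ** i:
--                 cpus.append((position * 4) + i)
--         position += 1
--     return cpus
-- ===== SOURCE B (Python) =====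
-- def _GetCpusFromIrqAffinity(affinity):
--     """returns a list of ints representing a single irq's associated CPUs"""
--     """e.g. 00000000,10000000,00000000"""
--     value = 0
--     shift = 0
--     for c in reversed(affinity):
--         if c == ',':
--             continue
--         value += int(c, 16) << shift
--         shift += 4
--     return [i for i in range(shift) if value & (1 << i)]
-- ===== Notes on version B (the rewrite author's own statement) =====
-- stated objective: alternative
-- what changed: B first accumulates the whole mask as one integer (nibble-by-nibble, least significant first) and then extracts the set bit positions in a separate scan over range(shift), replacing A's inline nested nibble/bit loop that appends CPU indices as it goes.
import Mathlib
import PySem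

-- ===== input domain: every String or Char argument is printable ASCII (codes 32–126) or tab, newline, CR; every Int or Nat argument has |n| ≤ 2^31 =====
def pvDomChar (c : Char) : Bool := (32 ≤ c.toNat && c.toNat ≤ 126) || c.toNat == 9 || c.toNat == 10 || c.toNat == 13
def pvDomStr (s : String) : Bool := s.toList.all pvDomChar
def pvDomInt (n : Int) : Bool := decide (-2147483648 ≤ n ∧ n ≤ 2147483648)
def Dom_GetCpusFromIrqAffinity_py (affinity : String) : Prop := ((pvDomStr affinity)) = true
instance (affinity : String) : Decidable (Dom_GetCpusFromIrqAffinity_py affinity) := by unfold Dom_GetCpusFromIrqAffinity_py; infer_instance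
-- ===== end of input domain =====

-- B builds the whole mask as one integer first and then scans its bits, instead of A's
-- inline nested nibble/bit loop — a different decomposition, not a speedup (B's big-integer
-- accumulation is slower than A on very large masks; objective: alternative).

-- shared helper: int(c, 16) for a single hex-digit character. On any other character
-- Python raises ValueError — those inputs are excluded by Pre_ — and we return 0 there.
def pvHexVal (c : Char) : Int :=
  if '0' ≤ c ∧ c ≤ '9' then (c.toNat : Int) - 48
  else if 'a' ≤ c ∧ c ≤ 'f' then (c.toNat : Int) - 87
  else if 'A' ≤ c ∧ c ≤ 'F' then (c.toNat : Int) - 55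
  else 0

-- ===== PORT A =====
-- state = (cpus, position); 2 ** i ported as 2 ^ i.toNat (exact: i ∈ range(4) is nonnegative);
-- Python's `n & e` truthiness test ported as Int.land n e ≠ 0.
def GetCpusFromIrqAffinity_py (affinity : String) : List Int :=
  (affinity.toList.reverse.foldl
    (fun (st : List Int × Int) c =>
      if c = ',' then st
      else
        let n := pvHexVal c
        let cpus := (PySem.List.pyRange 0 4 1).foldl
          (fun acc i => if Int.land n (2 ^ i.toNat) ≠ 0 then acc ++ [st.2 * 4 + i] else acc) st.1
        (cpus, st.2 + 1))
    ([], 0)).1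

-- ===== PORT B =====
-- state = (value, shift); `<<` ported as Int.shiftLeft with .toNat on the (nonnegative) shift.
def GetCpusFromIrqAffinity_py_alt (affinity : String) : List Int :=
  let st := affinity.toList.reverse.foldl
    (fun (st : Int × Int) c =>
      if c = ',' then st
      else (st.1 + (pvHexVal c <<< st.2.toNat), st.2 + 4))
    ((0 : Int), (0 : Int))
  (PySem.List.pyRange 0 st.2 1).filter (fun i => Int.land st.1 ((1 : Int) <<< i.toNat) != 0)

-- ===== PRECONDITION & SPEC =====
-- Pre_ excludes exactly the inputs on which Python's int(c, 16) raises ValueError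
-- (any character that is neither ',' nor a hex digit).
def Pre_GetCpusFromIrqAffinity_py (affinity : String) : Prop :=
  (affinity.toList.all (fun c =>
    c == ',' || ('0' ≤ c && c ≤ '9') || ('a' ≤ c && c ≤ 'f') || ('A' ≤ c && c ≤ 'F'))) = true
instance (affinity : String) : Decidable (Pre_GetCpusFromIrqAffinity_py affinity) := by
  unfold Pre_GetCpusFromIrqAffinity_py; infer_instance

def pvWitness_GetCpusFromIrqAffinity_py : String := "a0,3"

def Spec_GetCpusFromIrqAffinity_py (affinity : String) (out : List Int) : Prop := out = GetCpusFromIrqAffinity_py_alt affinity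
instance (affinity : String) (out : List Int) : Decidable (Spec_GetCpusFromIrqAffinity_py affinity out) := by unfold Spec_GetCpusFromIrqAffinity_py; infer_instance

-- ===== CLAIM (what is proved, stated in full; the proofs are below) =====
def Claim_equal_GetCpusFromIrqAffinity_py : Prop := ∀ (affinity : String), Dom_GetCpusFromIrqAffinity_py affinity → Pre_GetCpusFromIrqAffinity_py affinity → Spec_GetCpusFromIrqAffinity_py affinity (GetCpusFromIrqAffinity_py affinity)

-- ===== LEMMAS AND PROOFS =====

-- Nat-level nibble value
def pvHv (c : Char) : Nat :=
  if '0' ≤ c ∧ c ≤ '9' then c.toNat - 48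
  else if 'a' ≤ c ∧ c ≤ 'f' then c.toNat - 87
  else if 'A' ≤ c ∧ c ≤ 'F' then c.toNat - 55
  else 0

lemma pvCharLit : ('0':Char).toNat = 48 ∧ ('9':Char).toNat = 57 ∧ ('a':Char).toNat = 97 ∧
    ('f':Char).toNat = 102 ∧ ('A':Char).toNat = 65 ∧ ('F':Char).toNat = 70 := by decide

lemma pvCharLe {a c : Char} (h : a ≤ c) : a.toNat ≤ c.toNat := Fin.mk_le_mk.mp h

lemma pvHexVal_eq (c : Char) : pvHexVal c = ((pvHv c : Nat) : Int) := by
  obtain ⟨l0, l9, la, lf, lA, lF⟩ := pvCharLit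
  unfold pvHexVal pvHv
  split_ifs with h1 h2 h3
  · have := pvCharLe h1.1; omega
  · have := pvCharLe h2.1; omega
  · have := pvCharLe h3.1; omega
  · simp

lemma pvHv_lt (c : Char) : pvHv c < 16 := by
  obtain ⟨l0, l9, la, lf, lA, lF⟩ := pvCharLit
  unfold pvHv
  split_ifs with h1 h2 h3
  · have := pvCharLe h1.2; omega
  · have := pvCharLe h2.2; omega
  · have := pvCharLe h3.2; omega
  · omega

-- number of non-comma chars
def pvNd : List Char → Nat
  | [] => 0
  | c :: l => (if c = ',' then 0 else 1) + pvNd l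

-- the mask value, low nibble first
def pvMask : List Char → Nat
  | [] => 0
  | c :: l => if c = ',' then pvMask l else pvHv c + 16 * pvMask l

-- bit test as land against a power of two, over Int casts
lemma pvLand_testBit (h i : Nat) :
    (Int.land (h : Int) ((2 : Int) ^ i) ≠ 0) ↔ h.testBit i := by
  have : ((2 : Int) ^ i) = (((2 ^ i : Nat) : Int)) := by push_cast; ring
  rw [this]
  have : Int.land (h : Int) ((2 ^ i : Nat) : Int) = ((h &&& 2 ^ i : Nat) : Int) := by
    simp [Int.land]
  rw [this, Nat.and_two_pow]
  cases h.testBit i <;> simp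

-- CPU indices contributed by one nibble at position p
def pvNib (c : Char) (p : Nat) : List Int :=
  ((List.range 4).filter (fun i => (pvHv c).testBit i)).map (fun i => Int.ofNat (4 * p + i))

-- A's remaining contribution from list l starting at position p
def pvContrib : List Char → Nat → List Int
  | [], _ => []
  | c :: l, p => if c = ',' then pvContrib l p else pvNib c p ++ pvContrib l (p + 1)

-- the bit-scan output of a value v over s bit positions
def pvBits (v s : Nat) : List Int :=
  ((List.range s).filter (fun i => v.testBit i)).map (fun i => Int.ofNat i)

-- A's fold appends pvContrib
lemma pvA_inner (c : Char) (acc : List Int) (q : Nat) :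
    ((PySem.List.pyRange 0 4 1).foldl
      (fun a i => if Int.land (pvHexVal c) (2 ^ i.toNat) ≠ 0 then a ++ [(q : Int) * 4 + i] else a) acc)
    = acc ++ pvNib c q := by
  have hrange : PySem.List.pyRange 0 4 1 = [0, 1, 2, 3] := by decide
  rw [hrange]
  simp only [List.foldl_cons, List.foldl_nil, pvHexVal_eq]
  have e : ((0:Int).toNat = 0 ∧ (1:Int).toNat = 1 ∧ (2:Int).toNat = 2 ∧ (3:Int).toNat = 3) := by
    decide
  obtain ⟨e0, e1, e2, e3⟩ := e
  rw [e0, e1, e2, e3]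
  have b0 := pvLand_testBit (pvHv c) 0
  have b1 := pvLand_testBit (pvHv c) 1
  have b2 := pvLand_testBit (pvHv c) 2
  have b3 := pvLand_testBit (pvHv c) 3
  rcases h0 : (pvHv c).testBit 0 <;> rcases h1 : (pvHv c).testBit 1 <;>
    rcases h2 : (pvHv c).testBit 2 <;> rcases h3 : (pvHv c).testBit 3 <;>
    simp_all [pvNib, List.range_succ] <;> ring

-- A's fold appends pvContrib
lemma pvA_fold (l : List Char) (acc : List Int) (p : Nat) :
    (l.foldl
      (fun (st : List Int × Int) c =>
        if c = ',' then st
        else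
          let n := pvHexVal c
          let cpus := (PySem.List.pyRange 0 4 1).foldl
            (fun acc i => if Int.land n (2 ^ i.toNat) ≠ 0 then acc ++ [st.2 * 4 + i] else acc) st.1
          (cpus, st.2 + 1))
      (acc, (p : Int))).1 = acc ++ pvContrib l p := by
  induction l generalizing acc p with
  | nil => simp [pvContrib]
  | cons c l ih =>
    simp only [List.foldl_cons]
    by_cases h : c = ','
    · rw [if_pos h, ih acc p]
      simp [pvContrib, h]
    · rw [if_neg h, pvA_inner c acc p]
      have hstep : ((p : Int) + 1) = ((p + 1 : Nat) : Int) := by push_cast; ring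
      rw [hstep, ih]
      simp [pvContrib, h, List.append_assoc]

-- B's fold computes mask and shift
lemma pvB_fold (l : List Char) (v p : Nat) :
    (l.foldl
      (fun (st : Int × Int) c =>
        if c = ',' then st
        else (st.1 + (pvHexVal c <<< st.2.toNat), st.2 + 4))
      ((v : Int), ((4 * p : Nat) : Int)))
    = (((v + 2 ^ (4 * p) * pvMask l : Nat) : Int), ((4 * (p + pvNd l) : Nat) : Int)) := by
  induction l generalizing v p with
  | nil => simp [pvMask, pvNd]
  | cons c l ih =>
    simp only [List.foldl_cons]
    by_cases h : c = ','
    · rw [if_pos h, ih]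
      simp [pvMask, pvNd, h]
    · rw [if_neg h]
      have hsh : ((v : Int) + pvHexVal c <<< (((4 * p : Nat) : Int)).toNat)
          = (((v + 2 ^ (4 * p) * pvHv c : Nat)) : Int) := by
        rw [pvHexVal_eq, Int.toNat_natCast, Int.shiftLeft_eq]
        push_cast
        ring
      have hstep : (((4 * p : Nat) : Int) + 4) = ((4 * (p + 1) : Nat) : Int) := by push_cast; ring
      rw [hsh, hstep, ih]
      have hm : v + 2 ^ (4 * p) * pvHv c + 2 ^ (4 * (p + 1)) * pvMask l
          = v + 2 ^ (4 * p) * pvMask (c :: l) := by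
        simp only [pvMask, if_neg h]
        have h4 : 4 * (p + 1) = 4 * p + 4 := by ring
        rw [h4, pow_add]
        ring
      have hn : 4 * (p + 1 + pvNd l) = 4 * (p + pvNd (c :: l)) := by
        simp only [pvNd, if_neg h]
        ring
      rw [hm, hn]

-- the main combinatorial identity: bits of the accumulated mask = A's contributions
lemma pvMain (l : List Char) (v p : Nat) (hv : v < 2 ^ (4 * p)) :
    pvBits (v + 2 ^ (4 * p) * pvMask l) (4 * (p + pvNd l)) = pvBits v (4 * p) ++ pvContrib l p := by
  induction l generalizing v p with
  | nil => simp [pvMask, pvNd, pvContrib]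
  | cons c l ih =>
    by_cases h : c = ','
    · simpa [pvMask, pvNd, pvContrib, h] using ih v p hv
    · have h16 := pvHv_lt c
      have h4 : 4 * (p + 1) = 4 * p + 4 := by ring
      have hv' : v + 2 ^ (4 * p) * pvHv c < 2 ^ (4 * (p + 1)) := by
        rw [h4, pow_add]
        have h1 : 2 ^ (4 * p) * pvHv c ≤ 2 ^ (4 * p) * 15 :=
          Nat.mul_le_mul_left _ (by omega)
        omega
      have hm0 : pvMask (c :: l) = pvHv c + 16 * pvMask l := by simp [pvMask, h]
      have hrw : v + 2 ^ (4 * p) * pvMask (c :: l)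
          = (v + 2 ^ (4 * p) * pvHv c) + 2 ^ (4 * (p + 1)) * pvMask l := by
        rw [hm0, h4, pow_add]; ring
      have hnd : pvNd (c :: l) = 1 + pvNd l := by simp [pvNd, h]
      have hlow : ∀ i ∈ List.range (4 * p),
          (v + 2 ^ (4 * p) * pvHv c).testBit i = v.testBit i := by
        intro i hi
        rw [List.mem_range] at hi
        rw [Nat.add_comm v, Nat.testBit_two_pow_mul_add _ hv, if_pos hi]
      have hhigh : ∀ i ∈ List.range 4,
          ((fun j => (v + 2 ^ (4 * p) * pvHv c).testBit j) ∘ (fun i => 4 * p + i)) i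
            = (pvHv c).testBit i := by
        intro i hi
        simp only [Function.comp_apply]
        rw [Nat.add_comm v, Nat.testBit_two_pow_mul_add _ hv, if_neg (by omega)]
        simp
      have hr : List.range (4 * (p + 1))
          = List.range (4 * p) ++ (List.range 4).map (fun i => 4 * p + i) := by
        rw [h4, List.range_add]
      have hfilt : (List.range (4 * (p + 1))).filter (fun i => (v + 2 ^ (4 * p) * pvHv c).testBit i)
          = (List.range (4 * p)).filter (fun i => v.testBit i)
            ++ ((List.range 4).filter (fun i => (pvHv c).testBit i)).map (fun i => 4 * p + i) := by
        rw [hr, List.filter_append]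
        congr 1
        · exact List.filter_congr hlow
        · rw [List.filter_map]
          congr 1
          exact List.filter_congr hhigh
      have key : pvBits (v + 2 ^ (4 * p) * pvHv c) (4 * (p + 1)) = pvBits v (4 * p) ++ pvNib c p := by
        unfold pvBits pvNib
        rw [hfilt, List.map_append, List.map_map]
        rfl
      calc pvBits (v + 2 ^ (4 * p) * pvMask (c :: l)) (4 * (p + pvNd (c :: l)))
          = pvBits ((v + 2 ^ (4 * p) * pvHv c) + 2 ^ (4 * (p + 1)) * pvMask l) (4 * ((p + 1) + pvNd l)) := by
            rw [hrw, hnd]; congr 2; ring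
        _ = pvBits (v + 2 ^ (4 * p) * pvHv c) (4 * (p + 1)) ++ pvContrib l (p + 1) := ih _ _ hv'
        _ = pvBits v (4 * p) ++ pvNib c p ++ pvContrib l (p + 1) := by rw [key]
        _ = pvBits v (4 * p) ++ pvContrib (c :: l) p := by simp [pvContrib, h, List.append_assoc]

-- B's final scan equals pvBits
lemma pvB_scan (V S : Nat) :
    (PySem.List.pyRange 0 ((S : Nat) : Int) 1).filter
      (fun i => Int.land ((V : Nat) : Int)
        (@HShiftLeft.hShiftLeft Int Nat Int Int.instHShiftLeftNat (1 : Int) i.toNat) != 0)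
    = pvBits V S := by
  rw [PySem.List.pyRange_one]
  have hS : (((S : Nat) : Int) - 0).toNat = S := by simp
  rw [hS, List.filter_map]
  unfold pvBits
  have hpred : ∀ i ∈ List.range S,
      ((fun i : Int => Int.land ((V : Nat) : Int)
          (@HShiftLeft.hShiftLeft Int Nat Int Int.instHShiftLeftNat (1 : Int) i.toNat) != 0)
        ∘ (fun k : Nat => (0 : Int) + (k : Int))) i = V.testBit i := by
    intro i _
    simp only [Function.comp_apply]
    have h0 : ((0 : Int) + (i : Int)).toNat = i := by simp
    rw [h0]
    have hsl : (@HShiftLeft.hShiftLeft Int Nat Int Int.instHShiftLeftNat (1 : Int) i)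
        = (2 : Int) ^ i := by
      rw [Int.shiftLeft_eq]; ring
    rw [hsl]
    have hiff := pvLand_testBit V i
    rcases hb : V.testBit i <;> simp [hb] at hiff <;> simp [hiff]
  rw [List.filter_congr hpred]
  apply List.map_congr_left
  intro i _
  simp

-- ===== VERDICT (by name: the statement is the Claim_ definition above) =====
theorem GetCpusFromIrqAffinity_py_spec : Claim_equal_GetCpusFromIrqAffinity_py := by
  intro affinity _ _
  unfold Spec_GetCpusFromIrqAffinity_py GetCpusFromIrqAffinity_py GetCpusFromIrqAffinity_py_alt
  have hA := pvA_fold affinity.toList.reverse [] 0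
  have hB := pvB_fold affinity.toList.reverse 0 0
  simp only [Nat.cast_zero] at hA
  have h0 : ((4 * 0 : Nat) : Int) = 0 := by norm_num
  rw [h0] at hB
  rw [hA, hB]
  simp only []
  rw [pvB_scan]
  have := pvMain affinity.toList.reverse 0 0 (by norm_num)
  simp only [Nat.mul_zero, Nat.pow_zero, Nat.one_mul, Nat.zero_add] at this ⊢
  rw [this]
  simp [pvBits]
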